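-- pv_equiv track=rewrite | github.com/Matisse-Consortium/p2obt | libs/parser.py | _get_file_section
-- ===== SOURCE A (Python) =====
-- from typing import Dict, List, Optional
--
-- def _get_file_section(lines: List, identifier: str) -> Dict:
--     """Gets the section of a file corresponding to the given identifier and
--     returns a dict with the keys being the match to the identifier and the
--     values being a subset of the lines list
--
--     Parameters
--     ----------
--     lines: List
--         The lines read from a file
--     identifier: str
--         The identifier by which they should be split into subsets
--
--     Returns
--     --------
--     subset: dict
--         A dict that contains a subsets of the original lines
--     """
--     indices, labels = [], []
--     for index, line in enumerate(lines):
--         if line.lower().startswith(identifier):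
--             indices.append(index)
--             labels.append(line.replace('\n', ''))
--
--     if not indices:
--         indices, labels = [0], ["full_" + identifier]
--
--     sections = [lines[index:] if index == indices[~0] else \
--                   lines[index:indices[i+1]] for i, index in enumerate(indices)]
--     return {labels: sections for (labels, sections) in zip(labels, sections)}
-- ===== SOURCE B (Python) =====
-- def _get_file_section(lines, identifier):
--     """Single streaming pass: open a section at each matching line and
--     append following lines to it; no index collection or slicing."""
--     sections = {}
--     current = None
--     for line in lines:
--         if line.lower().startswith(identifier):
--             current = line.replace('\n', '')
--             sections[current] = [line]
--         elif current is not None: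
--             sections[current] = sections[current] + [line]
--     if not sections:
--         return {"full_" + identifier: list(lines)}
--     return sections
-- ===== Notes on version B (the rewrite author's own statement) =====
-- stated objective: simpler
-- what changed: B builds the result in one streaming pass that opens a section at each matching line and appends following lines to it, instead of A's three phases of collecting match indices, slicing the list between consecutive indices, and zipping into a dict.
import Mathlib
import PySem

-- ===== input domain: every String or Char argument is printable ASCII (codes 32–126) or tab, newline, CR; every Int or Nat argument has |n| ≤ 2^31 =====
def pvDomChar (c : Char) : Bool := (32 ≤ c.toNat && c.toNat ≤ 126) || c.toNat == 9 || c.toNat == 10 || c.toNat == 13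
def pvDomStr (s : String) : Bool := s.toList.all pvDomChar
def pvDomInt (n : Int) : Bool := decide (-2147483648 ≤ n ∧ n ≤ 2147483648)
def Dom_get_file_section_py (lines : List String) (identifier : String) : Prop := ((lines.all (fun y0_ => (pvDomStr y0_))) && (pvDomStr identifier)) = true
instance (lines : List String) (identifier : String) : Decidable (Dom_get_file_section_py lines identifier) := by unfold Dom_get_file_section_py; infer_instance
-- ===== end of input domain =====

-- B builds the result in one streaming pass (open a section at each matching line, append the
-- following lines to it) instead of A's three phases: collect match indices, slice between
-- consecutive indices, zip into a dict (objective: simpler).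

-- shared per-line primitives (the same Python expressions appear verbatim in Source A and Source B)
def pvMatch (identifier line : String) : Bool :=
  PySem.Str.startswith (PySem.Str.lower line) identifier          -- line.lower().startswith(identifier)
def pvLabel (line : String) : String :=
  PySem.Str.replace line "\n" ""                                  -- line.replace('\n', '')

-- ===== PORT A =====
-- loop body of `for index, line in enumerate(lines): if line.lower().startswith(identifier): …`
def pvAStep (identifier : String) (acc : List Int × List String) (p : Int × String) : List Int × List String :=
  if pvMatch identifier p.2 then (acc.1 ++ [p.1], acc.2 ++ [pvLabel p.2]) else acc

-- body of the `sections` comprehension: `lines[index:] if index == indices[~0] else lines[index:indices[i+1]]`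
-- (indices is never empty and i+1 is in range on the else branch, so the `.getD 0` defaults are unreachable)
def pvASec (lines : List String) (indices : List Int) (q : Int × Int) : List String :=
  if q.2 = (PySem.List.pyGet? indices (-1)).getD 0
  then PySem.List.slice lines (some q.2) none
  else PySem.List.slice lines (some q.2) (some ((PySem.List.pyGet? indices (q.1 + 1)).getD 0))

def get_file_section_py (lines : List String) (identifier : String) : List (String × List String) :=
  -- indices, labels = [], []; for index, line in enumerate(lines): …
  let acc : List Int × List String := (PySem.List.enumerate lines).foldl (pvAStep identifier) ([], [])
  -- if not indices: indices, labels = [0], ["full_" + identifier]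
  let indices : List Int := if acc.1 = [] then [(0 : Int)] else acc.1
  let labels : List String := if acc.1 = [] then ["full_" ++ identifier] else acc.2
  -- sections = [… for i, index in enumerate(indices)]
  let sections : List (List String) := (PySem.List.enumerate indices).map (pvASec lines indices)
  -- {labels: sections for (labels, sections) in zip(labels, sections)}
  ((labels.zip sections).foldl (fun d p => d.insert p.1 p.2)
      (PySem.Dict.empty : PySem.Dict String (List String))).items

-- ===== PORT B =====
-- loop body of B's single pass: state = (sections dict, currently open label or None)
def pvBStep (identifier : String) (st : PySem.Dict String (List String) × Option String)
    (line : String) : PySem.Dict String (List String) × Option String :=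
  if pvMatch identifier line then
    let cur := pvLabel line
    (st.1.insert cur [line], some cur)
  else
    match st.2 with
    | some cur => (st.1.insert cur (st.1.getD cur [] ++ [line]), st.2)  -- sections[current] = sections[current] + [line]; key always present
    | none => st

def get_file_section_py_alt (lines : List String) (identifier : String) : List (String × List String) :=
  -- sections = {}; current = None; for line in lines: …
  let st := lines.foldl (pvBStep identifier)
      ((PySem.Dict.empty : PySem.Dict String (List String)), (none : Option String))
  -- if not sections: return {"full_" + identifier: list(lines)}
  if st.1.items = [] then [("full_" ++ identifier, lines)] else st.1.items

-- ===== PRECONDITION & SPEC =====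
def Spec_get_file_section_py (lines : List String) (identifier : String) (out : List (String × List String)) : Prop := out = get_file_section_py_alt lines identifier
instance (lines : List String) (identifier : String) (out : List (String × List String)) : Decidable (Spec_get_file_section_py lines identifier out) := by unfold Spec_get_file_section_py; infer_instance

-- ===== CLAIM (what is proved, stated in full; the proofs are below) =====
def Claim_equal_get_file_section_py : Prop := ∀ (lines : List String) (identifier : String), Dom_get_file_section_py lines identifier → Spec_get_file_section_py lines identifier (get_file_section_py lines identifier)

-- ===== LEMMAS AND PROOFS =====

-- Nat-indexed enumerate (proof-side mirror of PySem.List.enumerate)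
def pvNatEnum {α : Type} : List α → Nat → List (Nat × α)
  | [], _ => []
  | x :: xs, s => (s, x) :: pvNatEnum xs (s + 1)

lemma pvNatEnum_cast {α : Type} (xs : List α) (s : Nat) :
    PySem.List.enumerate xs (s : Int) = (pvNatEnum xs s).map (fun p => ((p.1 : Int), p.2)) := by
  induction xs generalizing s with
  | nil => simp [pvNatEnum, PySem.List.enumerate_nil]
  | cons x xs ih =>
      rw [PySem.List.enumerate_cons]
      have h1 : (s : Int) + 1 = ((s + 1 : Nat) : Int) := by push_cast; ring
      rw [h1, ih]
      simp [pvNatEnum]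

lemma pvNatEnum_mem_le {α : Type} (xs : List α) (s : Nat) :
    ∀ q ∈ pvNatEnum xs s, s ≤ q.1 := by
  induction xs generalizing s with
  | nil => intro q hq; simp [pvNatEnum] at hq
  | cons x xs ih =>
      intro q hq
      simp only [pvNatEnum, List.mem_cons] at hq
      rcases hq with h | h
      · subst h; exact le_refl s
      · have := ih (s + 1) q h; omega

lemma pvNatEnum_pairwise {α : Type} (xs : List α) (s : Nat) :
    (pvNatEnum xs s).Pairwise (fun p q => p.1 < q.1) := by
  induction xs generalizing s with
  | nil => simp [pvNatEnum]
  | cons x xs ih =>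
      refine List.Pairwise.cons ?_ (ih (s + 1))
      intro q hq
      have := pvNatEnum_mem_le xs (s + 1) q hq
      omega

-- the section stream: go (label, accumulated section) remaining-lines
def pvGo (identifier : String) : String × List String → List String → List (String × List String)
  | cur, [] => [cur]
  | cur, x :: xs =>
      if pvMatch identifier x then cur :: pvGo identifier (pvLabel x, [x]) xs
      else pvGo identifier (cur.1, cur.2 ++ [x]) xs

def pvPairs (identifier : String) : List String → List (String × List String)
  | [] => []
  | x :: xs => if pvMatch identifier x then pvGo identifier (pvLabel x, [x]) xs else pvPairs identifier xs

-- A's zipped (label, section) list as a function of the matched (position, line) list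
def pvGzip (lines : List String) : List (Nat × String) → List (String × List String)
  | [] => []
  | [(j, x)] => [(pvLabel x, lines.drop j)]
  | (j, x) :: (j', x') :: rest =>
      (pvLabel x, (lines.drop j).take (j' - j)) :: pvGzip lines ((j', x') :: rest)

lemma pvGzip_ne_nil (lines : List String) (p : Nat × String) (rest : List (Nat × String)) :
    pvGzip lines (p :: rest) ≠ [] := by
  cases rest with
  | nil => simp [pvGzip]
  | cons q t => simp [pvGzip]

-- A's accumulator loop is a filter-and-map
lemma pvFoldPair (identifier : String) (l : List (Int × String)) (a : List Int) (b : List String) :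
    l.foldl (pvAStep identifier) (a, b)
      = (a ++ (l.filter (fun p => pvMatch identifier p.2)).map (·.1),
         b ++ (l.filter (fun p => pvMatch identifier p.2)).map (fun p => pvLabel p.2)) := by
  induction l generalizing a b with
  | nil => simp
  | cons p l ih =>
      by_cases h : pvMatch identifier p.2
      · simp only [List.foldl_cons, pvAStep, h, if_pos, List.filter_cons, List.map_cons]
        rw [ih]
        simp
      · simp only [List.foldl_cons, pvAStep, h, if_neg, List.filter_cons, Bool.false_eq_true,
          not_false_eq_true]
        rw [ih]

-- B's loop with an open section (cur, s) computes the insert-fold of the section stream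
lemma pvBgo (identifier : String) (xs : List String) :
    ∀ (d : PySem.Dict String (List String)) (cur : String) (s : List String),
      (xs.foldl (pvBStep identifier) (d.insert cur s, some cur)).1
        = (pvGo identifier (cur, s) xs).foldl (fun d p => d.insert p.1 p.2) d := by
  induction xs with
  | nil => intro d cur s; simp [pvGo]
  | cons y ys ih =>
      intro d cur s
      by_cases h : pvMatch identifier y
      · simp only [List.foldl_cons, pvBStep, h, if_pos, pvGo]
        rw [ih (d.insert cur s) (pvLabel y) [y]]
      · simp only [List.foldl_cons, pvBStep, h, Bool.false_eq_true, if_neg, not_false_eq_true,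
          pvGo, PySem.Dict.getD_insert_self, PySem.Dict.insert_insert_self]
        exact ih d cur (s ++ [y])

-- B's whole loop computes the insert-fold of pvPairs
lemma pvBtop (identifier : String) (xs : List String) :
    (xs.foldl (pvBStep identifier) ((PySem.Dict.empty : PySem.Dict String (List String)), none)).1
      = (pvPairs identifier xs).foldl (fun d p => d.insert p.1 p.2) PySem.Dict.empty := by
  induction xs with
  | nil => simp [pvPairs]
  | cons y ys ih =>
      by_cases h : pvMatch identifier y
      · simp only [List.foldl_cons, pvBStep, h, if_pos, pvPairs]
        exact pvBgo identifier ys PySem.Dict.empty (pvLabel y) [y]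
      · simpa only [List.foldl_cons, pvBStep, h, Bool.false_eq_true, if_neg, not_false_eq_true,
          pvPairs] using ih

-- A's zip of labels with sections is pvGzip of the matched (position, line) list
lemma pvA3 (lines : List String) (M : List (Nat × String))
    (hP : M.Pairwise (fun p q => p.1 < q.1)) :
    ∀ (t : List (Nat × String)) (k : Nat), M.drop k = t →
      (((M.map (fun p => pvLabel p.2)).drop k).zip
        ((PySem.List.enumerate ((M.map (fun p => ((p.1 : Int)))).drop k) (k : Int)).map
          (pvASec lines (M.map (fun p => ((p.1 : Int)))))))
        = pvGzip lines t := by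
  intro t
  induction t with
  | nil =>
      intro k hk
      rw [← List.map_drop, ← List.map_drop, hk]
      simp [PySem.List.enumerate_nil, pvGzip]
  | cons p t' ih =>
      intro k hk
      have hklt : k < M.length := by
        by_contra hc
        have : M.drop k = [] := List.drop_eq_nil_iff.mpr (by omega)
        rw [hk] at this
        exact List.cons_ne_nil p t' this
      have hsplit := List.drop_eq_getElem_cons hklt
      rw [hk] at hsplit
      have hpk : M[k] = p := (List.cons.injEq _ _ _ _ ▸ hsplit).1.symm
      have hk' : M.drop (k + 1) = t' := ((List.cons.injEq _ _ _ _ ▸ hsplit).2).symm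
      rw [← List.map_drop, ← List.map_drop, hk]
      rw [List.map_cons, List.map_cons, PySem.List.enumerate_cons]
      have hcast : (k : Int) + 1 = ((k + 1 : Nat) : Int) := by push_cast; ring
      rw [hcast, List.map_cons, List.zip_cons_cons]
      -- head section
      cases t' with
      | nil =>
          -- p is the last match
          have hlen : M.length = k + 1 := by
            have : M.drop (k+1) = [] := hk'
            have h2 := List.drop_eq_nil_iff.mp this
            omega
          have hlast : (M.map (fun p => ((p.1 : Int)))).getLast? = some ((p.1 : Int)) := by
            have h3 : M.map (fun p => ((p.1 : Int)))
                = (M.map (fun p => ((p.1 : Int)))).take k ++ [((p.1 : Int))] := by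
              conv_lhs => rw [← List.take_append_drop k (M.map (fun p => ((p.1 : Int))))]
              rw [← List.map_drop, hk]
              simp
            rw [h3, List.getLast?_concat]
          have hsec : pvASec lines (M.map (fun p => ((p.1 : Int)))) ((k : Int), ((p.1 : Int)))
              = lines.drop p.1 := by
            unfold pvASec
            rw [PySem.List.pyGet?_neg_one, hlast]
            simp [PySem.List.slice_from_natCast]
          rw [hsec]
          cases p
          simp [PySem.List.enumerate_nil, pvGzip]
      | cons q t'' =>
          have hk1lt : k + 1 < M.length := by
            by_contra hc
            have : M.drop (k+1) = [] := List.drop_eq_nil_iff.mpr (by omega)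
            rw [hk'] at this
            exact List.cons_ne_nil q t'' this
          have hsplit2 := List.drop_eq_getElem_cons hk1lt
          rw [hk'] at hsplit2
          have hqk : M[k+1] = q := (List.cons.injEq _ _ _ _ ▸ hsplit2).1.symm
          have hlastlt : M[k].1 < (M[M.length - 1]'(by omega)).1 := by
            exact List.pairwise_iff_getElem.mp hP k (M.length - 1) hklt (by omega) (by omega)
          have hlast : (M.map (fun p => ((p.1 : Int)))).getLast?
              = some (((M[M.length - 1]'(by omega)).1 : Int)) := by
            rw [List.getLast?_eq_getElem?]
            rw [List.length_map, List.getElem?_map]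
            rw [List.getElem?_eq_getElem (by omega : M.length - 1 < M.length)]
            rfl
          have hsec : pvASec lines (M.map (fun p => ((p.1 : Int)))) ((k : Int), ((p.1 : Int)))
              = (lines.drop p.1).take (q.1 - p.1) := by
            unfold pvASec
            rw [PySem.List.pyGet?_neg_one, hlast]
            have hne : ((p.1 : Int)) ≠ (((M[M.length - 1]'(by omega)).1 : Int)) := by
              rw [← hpk]
              intro hcon
              have : M[k].1 = (M[M.length - 1]'(by omega)).1 := by exact_mod_cast hcon
              omega
            rw [Option.getD_some, if_neg hne]
            rw [hcast, PySem.List.pyGet?_natCast, List.getElem?_map,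
              List.getElem?_eq_getElem hk1lt, hqk]
            simp [PySem.List.slice_natCast]
          rw [hsec]
          have ihh := ih (k+1) hk'
          rw [← List.map_drop, ← List.map_drop, hk'] at ihh
          rw [ihh]
          cases p
          cases q
          simp [pvGzip]


-- pvGzip of the matches of a suffix, with an open match at jn, is pvGo
lemma pvA5 (identifier : String) (lines : List String) :
    ∀ (xs : List String) (s jn : Nat) (x : String),
      xs = lines.drop s → jn < s → s ≤ lines.length →
      pvGzip lines ((jn, x) :: (pvNatEnum xs s).filter (fun p => pvMatch identifier p.2))
        = pvGo identifier (pvLabel x, (lines.drop jn).take (s - jn)) xs := by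
  intro xs
  induction xs with
  | nil =>
      intro s jn x hxs hjn hs
      have hsl : lines.length ≤ s := List.drop_eq_nil_iff.mp hxs.symm
      have hse : s = lines.length := le_antisymm hs hsl
      have : (lines.drop jn).take (s - jn) = lines.drop jn := by
        apply List.take_of_length_le
        simp [List.length_drop]
        omega
      simp [pvNatEnum, pvGzip, pvGo, this]
  | cons y ys ih =>
      intro s jn x hxs hjn hs
      have hd : lines.drop s = y :: ys := hxs.symm
      have hslt : s < lines.length := by
        by_contra hc
        have : lines.drop s = [] := List.drop_eq_nil_iff.mpr (by omega)
        rw [hd] at this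
        exact List.cons_ne_nil y ys this
      have hys : ys = lines.drop (s + 1) := by
        have h1 : (lines.drop s).drop 1 = lines.drop (s + 1) := List.drop_drop
        rw [hd] at h1
        simpa using h1
      have hy : lines[s]? = some y := by
        have h0 : (lines.drop s)[0]? = some y := by rw [hd]; rfl
        rw [List.getElem?_drop] at h0
        simpa using h0
      have htake : ∀ j : Nat, j ≤ s → (lines.drop j).take (s + 1 - j) = (lines.drop j).take (s - j) ++ [y] := by
        intro j hj
        have h1 : s + 1 - j = (s - j) + 1 := by omega
        rw [h1, List.take_add_one]
        have h2 : (lines.drop j)[s - j]? = some y := by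
          rw [List.getElem?_drop]
          have : j + (s - j) = s := by omega
          rw [this, hy]
        rw [h2]
        rfl
      simp only [pvNatEnum, List.filter_cons]
      by_cases h : pvMatch identifier y
      · simp only [h, if_pos]
        have htail := ih (s + 1) s y hys (by omega) (by omega)
        have h1 : (lines.drop s).take (s + 1 - s) = [y] := by
          have := htake s (le_refl s)
          simpa using this
        rw [h1] at htail
        simp only [pvGzip, pvGo, h, if_pos]
        rw [htail]
      · simp only [h, Bool.false_eq_true, if_neg, not_false_eq_true]
        have htail := ih (s + 1) jn x hys (by omega) (by omega)
        rw [htake jn (by omega)] at htail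
        simp only [pvGo, h, Bool.false_eq_true, if_neg, not_false_eq_true]
        exact htail

-- pvGzip of all matches of a suffix is pvPairs
lemma pvAtop (identifier : String) (lines : List String) :
    ∀ (xs : List String) (s : Nat), xs = lines.drop s → s ≤ lines.length →
      pvGzip lines ((pvNatEnum xs s).filter (fun p => pvMatch identifier p.2))
        = pvPairs identifier xs := by
  intro xs
  induction xs with
  | nil => intro s _ _; simp [pvNatEnum, pvGzip, pvPairs]
  | cons y ys ih =>
      intro s hxs hs
      have hd : lines.drop s = y :: ys := hxs.symm
      have hslt : s < lines.length := by
        by_contra hc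
        have : lines.drop s = [] := List.drop_eq_nil_iff.mpr (by omega)
        rw [hd] at this
        exact List.cons_ne_nil y ys this
      have hys : ys = lines.drop (s + 1) := by
        have h1 : (lines.drop s).drop 1 = lines.drop (s + 1) := List.drop_drop
        rw [hd] at h1
        simpa using h1
      simp only [pvNatEnum, List.filter_cons, pvPairs]
      by_cases h : pvMatch identifier y
      · simp only [h, if_pos]
        have := pvA5 identifier lines ys (s + 1) s y hys (by omega) (by omega)
        have h1 : (lines.drop s).take (s + 1 - s) = [y] := by
          rw [hd]
          simp
        rw [h1] at this
        exact this
      · simp only [h, Bool.false_eq_true, if_neg, not_false_eq_true]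
        exact ih (s + 1) hys (by omega)

-- a fold of inserts over a nonempty pair list has nonempty items
lemma pvItems_ne_nil (p : String × List String) (rest : List (String × List String)) :
    (((p :: rest).foldl (fun d q => d.insert q.1 q.2)
        (PySem.Dict.empty : PySem.Dict String (List String))).items) ≠ [] := by
  intro h
  have hk : (((p :: rest).foldl (fun d q => d.insert q.1 q.2)
      (PySem.Dict.empty : PySem.Dict String (List String))).keys)
        = PySem.Set.update (PySem.Dict.keys (PySem.Dict.empty : PySem.Dict String (List String)))
            ((p :: rest).map (fun q => q.1)) :=
    PySem.Dict.keys_foldl_insert_key _ _ _ _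
  rw [PySem.Dict.keys_empty, PySem.Set.update_nil_left] at hk
  have hmem : p.1 ∈ PySem.Set.ofList ((p :: rest).map (fun q => q.1)) := by
    rw [PySem.Set.mem_ofList]; simp
  rw [← hk] at hmem
  simp only [PySem.Dict.keys, h] at hmem
  simp at hmem

-- ===== VERDICT (by name: the statement is the Claim_ definition above) =====
theorem get_file_section_py_spec : Claim_equal_get_file_section_py := by
  intro lines identifier _
  show get_file_section_py lines identifier = get_file_section_py_alt lines identifier
  have hE : PySem.List.enumerate lines
      = (pvNatEnum lines 0).map (fun p => ((p.1 : Int), p.2)) := by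
    have h := pvNatEnum_cast lines 0
    simpa using h
  have hacc : (PySem.List.enumerate lines).foldl (pvAStep identifier) ([], [])
      = (((pvNatEnum lines 0).filter (fun p => pvMatch identifier p.2)).map (fun p => ((p.1 : Int))),
         ((pvNatEnum lines 0).filter (fun p => pvMatch identifier p.2)).map (fun p => pvLabel p.2)) := by
    rw [hE, pvFoldPair, List.filter_map]
    simp [Function.comp_def]
  have hPairwise : ((pvNatEnum lines 0).filter (fun p => pvMatch identifier p.2)).Pairwise
      (fun p q => p.1 < q.1) := (pvNatEnum_pairwise lines 0).filter _
  have hPairs : pvGzip lines ((pvNatEnum lines 0).filter (fun p => pvMatch identifier p.2))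
      = pvPairs identifier lines :=
    pvAtop identifier lines lines 0 (by simp) (Nat.zero_le _)
  have hBtop := pvBtop identifier lines
  have hEmp : (PySem.Dict.empty : PySem.Dict String (List String)).items = [] := rfl
  cases hM0 : (pvNatEnum lines 0).filter (fun p => pvMatch identifier p.2) with
  | nil =>
      have hPnil : pvPairs identifier lines = [] := by rw [← hPairs, hM0]; rfl
      simp only [get_file_section_py, get_file_section_py_alt]
      rw [hacc, hM0, hBtop, hPnil]
      simp only [List.map_nil, List.foldl_nil, reduceIte]
      rw [hEmp]
      simp only [reduceIte]
      have hEn : PySem.List.enumerate [(0 : Int)] = [((0 : Int), (0 : Int))] := by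
        rw [PySem.List.enumerate_cons, PySem.List.enumerate_nil]
      rw [hEn]
      have hsec : pvASec lines [(0 : Int)] ((0 : Int), (0 : Int)) = lines := by
        unfold pvASec
        rw [PySem.List.pyGet?_neg_one]
        simp [PySem.List.slice_zero_start, PySem.List.slice_none_none]
      simp [hsec, PySem.Dict.items_insert_of_not_contains, PySem.Dict.contains_empty, hEmp]
  | cons p rest =>
      have hPcons : pvPairs identifier lines = pvGzip lines (p :: rest) := by
        rw [← hPairs, hM0]
      simp only [get_file_section_py, get_file_section_py_alt]
      rw [hacc, hM0, hBtop]
      have hne : (p :: rest).map (fun p => ((p.1 : Int))) ≠ [] := by simp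
      rw [if_neg hne, if_neg hne]
      have hA3 := pvA3 lines (p :: rest) (hM0 ▸ hPairwise) (p :: rest) 0 rfl
      rw [List.drop_zero, List.drop_zero, Nat.cast_zero] at hA3
      rw [hA3, ← hPcons]
      cases hPP : pvPairs identifier lines with
      | nil => rw [hPcons] at hPP; exact absurd hPP (pvGzip_ne_nil lines p rest)
      | cons p' rest' =>
          rw [if_neg (pvItems_ne_nil p' rest')]
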